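-- pv_equiv track=rewrite | github.com/sajinavi2006/julomvp | mvp/src/juloserver/juloserver/apiv2/utils.py | mask_fullname_each_word
-- ===== SOURCE A (Python) =====
-- def mask_fullname_each_word(name):
--     words = name.split()
--     masked_words = []
--
--     for word in words:
--         if len(word) == 1:
--             masked_words.append(word)
--         elif len(word) == 2:
--             masked_word = word[0] + '*'
--             masked_words.append(masked_word)
--         else:
--             masked_word = word[0] + '*' * (len(word) - 2) + word[-1]
--             masked_words.append(masked_word)
--
--     return ' '.join(masked_words)
-- ===== SOURCE B (Python) =====
-- def mask_fullname_each_word(name):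
--     masked_words = []
--     for word in name.split():
--         masked_words.append(''.join(
--             c if i == 0 or (i == len(word) - 1 and len(word) >= 3) else '*'
--             for i, c in enumerate(word)))
--     return ' '.join(masked_words)
-- ===== Notes on version B (the rewrite author's own statement) =====
-- stated objective: alternative
-- what changed: Replaces A's per-word length branching with star multiplication by a single per-character pass over each word that keeps a character iff its index is 0 or it is the last index of a word of length >= 3.
import Mathlib
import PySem

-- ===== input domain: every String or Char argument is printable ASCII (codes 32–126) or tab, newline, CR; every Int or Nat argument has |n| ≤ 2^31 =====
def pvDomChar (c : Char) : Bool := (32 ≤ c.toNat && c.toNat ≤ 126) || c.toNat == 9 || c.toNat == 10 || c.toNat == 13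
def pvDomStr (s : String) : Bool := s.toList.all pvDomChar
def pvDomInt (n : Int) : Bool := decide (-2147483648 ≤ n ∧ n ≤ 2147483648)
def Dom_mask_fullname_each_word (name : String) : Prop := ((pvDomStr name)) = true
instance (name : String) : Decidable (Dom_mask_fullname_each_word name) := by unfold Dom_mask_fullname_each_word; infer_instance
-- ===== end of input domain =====

-- B masks each word by a per-character positional rule (index 0 or last-with-len>=3 kept) instead of A's per-word length branching with star multiplication; objective: alternative decomposition, same cost.

-- ===== PORT A =====
-- word-level branch on length, as in A's loop body
def pvMaskWordA (word : List Char) : List Char :=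
  if PySem.List.len word = 1 then word
  else if PySem.List.len word = 2 then
    (match PySem.List.pyGet? word 0 with | some c => [c] | none => []) ++ ['*']
  else
    (match PySem.List.pyGet? word 0 with | some c => [c] | none => []) ++
      List.replicate (word.length - 2) '*' ++
      (match PySem.List.pyGet? word (-1) with | some c => [c] | none => [])

def mask_fullname_each_word (name : String) : String :=
  let words := PySem.Chars.split₀ name.toList
  let masked_words := words.foldl (fun acc w => acc ++ [pvMaskWordA w]) []
  String.mk (PySem.Chars.join [' '] masked_words)

-- ===== PORT B =====
-- per-character positional masking, as in B's generator over enumerate(word)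
def pvMaskWordB (word : List Char) : List Char :=
  (PySem.List.enumerate word).map (fun p =>
    if p.1 = 0 ∨ (p.1 = PySem.List.len word - 1 ∧ 3 ≤ PySem.List.len word) then p.2 else '*')

def mask_fullname_each_word_alt (name : String) : String :=
  String.mk (PySem.Chars.join [' ']
    ((PySem.Chars.split₀ name.toList).foldl (fun acc w => acc ++ [pvMaskWordB w]) []))

-- ===== PRECONDITION & SPEC =====
def Spec_mask_fullname_each_word (name : String) (out : String) : Prop := out = mask_fullname_each_word_alt name
instance (name : String) (out : String) : Decidable (Spec_mask_fullname_each_word name out) := by unfold Spec_mask_fullname_each_word; infer_instance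

-- ===== CLAIM (what is proved, stated in full; the proofs are below) =====
def Claim_equal_mask_fullname_each_word : Prop := ∀ (name : String), Dom_mask_fullname_each_word name → Spec_mask_fullname_each_word name (mask_fullname_each_word name)

-- ===== LEMMAS AND PROOFS =====

theorem maskWord_eq (w : List Char) : pvMaskWordA w = pvMaskWordB w := by
  match w with
  | [] => decide
  | [a] => simp [pvMaskWordA, pvMaskWordB, PySem.List.enumerate]
  | [a, b] => simp [pvMaskWordA, pvMaskWordB, PySem.List.enumerate]
  | a :: b :: c :: rest =>
    obtain ⟨mid, z, hmz⟩ : ∃ mid z, b :: c :: rest = mid ++ [z] := by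
      rcases List.eq_nil_or_concat (b :: c :: rest) with h | ⟨mid, z, h⟩
      · simp at h
      · exact ⟨mid, z, by simpa using h⟩
    have hml : 1 ≤ mid.length := by
      have := congrArg List.length hmz; simp at this; omega
    rw [show a :: b :: c :: rest = a :: (mid ++ [z]) by rw [hmz]]
    have hA : pvMaskWordA (a :: (mid ++ [z])) = a :: (List.replicate mid.length '*' ++ [z]) := by
      unfold pvMaskWordA
      rw [if_neg (by simp [PySem.List.len]; omega), if_neg (by simp [PySem.List.len]; omega)]
      simp [PySem.List.pyGet?_zero_cons, PySem.List.pyGet?_neg_one]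
      rw [show a :: (mid ++ [z]) = (a :: mid) ++ [z] from rfl, List.getLast?_concat]
    have hB : pvMaskWordB (a :: (mid ++ [z])) = a :: (List.replicate mid.length '*' ++ [z]) := by
      unfold pvMaskWordB
      rw [PySem.List.enumerate_cons, PySem.List.enumerate_append,
        List.map_cons, List.map_append]
      rw [if_pos (by norm_num)]
      congr 1
      congr 1
      · have : ∀ p ∈ PySem.List.enumerate mid (0 + 1),
            (if p.1 = 0 ∨ p.1 = PySem.List.len (a :: (mid ++ [z])) - 1 ∧
                3 ≤ PySem.List.len (a :: (mid ++ [z])) then p.2 else '*') = '*' := by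
          intro p hp
          rw [PySem.List.mem_enumerate_iff] at hp
          obtain ⟨k, hk, rfl⟩ := hp
          rw [if_neg]
          simp [PySem.List.len]
          omega
        rw [List.map_congr_left this]
        simp [List.map_const', PySem.List.length_enumerate]
      · rw [show PySem.List.enumerate [z] (0 + 1 + mid.length) = [((0 + 1 + mid.length : Int), z)] from rfl]
        rw [List.map_cons, if_pos (by simp [PySem.List.len]; omega)]
        rfl
    rw [hA, hB]

theorem pv_foldl_app {α β : Type} (f : α → β) (l : List α) (acc : List β) :
    l.foldl (fun acc w => acc ++ [f w]) acc = acc ++ l.map f := by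
  induction l generalizing acc with
  | nil => simp
  | cons x xs ih => simp [ih]

theorem mask_fullname_each_word_spec : Claim_equal_mask_fullname_each_word := by
  intro name _
  unfold Spec_mask_fullname_each_word
  simp only [mask_fullname_each_word, mask_fullname_each_word_alt, pv_foldl_app, List.nil_append]
  congr 1
  exact congrArg _ (List.map_congr_left fun w _ => maskWord_eq w)
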